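-- pv_equiv track=rewrite | github.com/davidhalasz/university-projects | python/munchausen.py | munchausen
-- ===== SOURCE A (Python) =====
-- def munchausen(n):
--     """A fuggveny visszaadja Munchausen szamokat."""
--     numbers = []
--     num = 0
--     for i in range(n):
--         for d in str(i):
--             if int(d) != 0:
--                 num += int(d) ** int(d)
--         if i == num:
--             numbers.append(i)
--         num = 0
--     return numbers
-- ===== SOURCE B (Python) =====
-- # Enumerate nondecreasing digit combinations (multisets) instead of scanning every
-- # integer below n: only polynomially-many-in-the-digit-count candidates are checked,
-- # an asymptotic speed-up.
--
-- def _digits(m):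
--     """Decimal digits of m >= 0, least significant first."""
--     if m == 0:
--         return [0]
--     ds = []
--     while m > 0:
--         ds.append(m % 10)
--         m //= 10
--     return ds
--
--
-- def _combos(length, start):
--     """All nondecreasing digit lists of the given length with digits in [start, 9]."""
--     if length == 0:
--         return [[]]
--     return [[d] + rest for d in range(start, 10) for rest in _combos(length - 1, d)]
--
--
-- def _powsum(combo):
--     return sum(d ** d for d in combo if d != 0)
--
--
-- def munchausen(n):
--     """A fuggveny visszaadja Munchausen szamokat."""
--     if n <= 0:
--         return []
--     d = len(_digits(n - 1))
--     found = [_powsum(c)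
--              for length in range(1, d + 1)
--              for c in _combos(length, 0)
--              if _powsum(c) < n and sorted(_digits(_powsum(c))) == c]
--     return sorted(found)
-- ===== Notes on version B (the rewrite author's own statement) =====
-- stated objective: faster
-- what changed: Instead of scanning every integer below n and summing digit powers for each, B enumerates the nondecreasing digit combinations (digit multisets) of up to as many digits as n-1 has, keeps the power sums that are below n and reproduce their own digit multiset, and returns them sorted.
import Mathlib
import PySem

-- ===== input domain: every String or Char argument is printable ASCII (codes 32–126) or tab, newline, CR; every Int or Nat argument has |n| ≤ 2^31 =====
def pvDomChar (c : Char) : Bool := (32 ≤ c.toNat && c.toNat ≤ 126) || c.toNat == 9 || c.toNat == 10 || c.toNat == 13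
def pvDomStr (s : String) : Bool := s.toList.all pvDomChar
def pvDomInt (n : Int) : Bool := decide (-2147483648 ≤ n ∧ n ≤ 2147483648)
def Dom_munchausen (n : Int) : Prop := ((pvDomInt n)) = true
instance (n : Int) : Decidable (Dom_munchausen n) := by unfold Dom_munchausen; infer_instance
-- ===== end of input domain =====

-- B replaces A's scan of every integer below n by an enumeration of nondecreasing digit
-- combinations, verifying each candidate sum; asymptotically fewer candidates are examined.


-- ===== PORT A =====
-- int(d) for a single character d of str(i): PySem.Int.ofChars? is `some` on every
-- character of str(i) for the i ≥ 0 that range(n) produces, so `.getD 0` is never taken.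
def munchausenDigitVal (c : Char) : Int := (PySem.Int.ofChars? [c]).getD 0

-- the inner `for d in str(i)` loop of A; `int(d) ** int(d)` is ported as
-- `d ^ d.toNat` (exact, since every digit value is nonnegative)
def munchausenInner (i : Int) (num0 : Int) : Int :=
  (PySem.Int.toChars i).foldl (fun num c =>
    if munchausenDigitVal c ≠ 0 then
      num + munchausenDigitVal c ^ (munchausenDigitVal c).toNat
    else num) num0

def munchausen (n : Int) : List Int :=
  ((PySem.List.pyRange 0 n).foldl (fun st i =>
      let num := munchausenInner i st.2
      ((if i = num then st.1 ++ [i] else st.1), (0 : Int))) (([] : List Int), (0 : Int))).1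

-- ===== PORT B =====
-- B only ever handles nonnegative integers whose value is a digit (0..9) or a digit
-- power sum, so those intermediate values are carried as Nat and cast where Source B
-- compares them with n or appends them to the result (exact for nonnegative values).

-- the `while m > 0: ds.append(m % 10); m //= 10` loop of Source B's _digits
def pvDigitsAux : Nat → List Nat
  | 0 => []
  | (m+1) => ((m+1) % 10) :: pvDigitsAux ((m+1) / 10)
  decreasing_by exact Nat.div_lt_self (Nat.succ_pos m) (by omega)

def pvDigits (m : Nat) : List Nat := if m = 0 then [0] else pvDigitsAux m

-- Source B's _combos: all nondecreasing digit lists of the given length with digits in [start, 9]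
def pvCombos : Nat → Nat → List (List Nat)
  | 0, _ => [[]]
  | (l+1), start =>
      ((List.range' start (10 - start)).map
        (fun d => (pvCombos l d).map (fun rest => d :: rest))).flatten

-- Source B's _powsum; `d ** d` is ported as `d ^ d` on Nat (digits are nonnegative)
def pvPowsum (c : List Nat) : Nat := ((c.filter (fun d => d ≠ 0)).map (fun d => d ^ d)).sum

def munchausen_alt (n : Int) : List Int :=
  if n ≤ 0 then [] else
    let d := (pvDigits (n - 1).toNat).length
    let found : List Int :=
      ((List.range' 1 d).map (fun len =>
        ((pvCombos len 0).filter (fun c =>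
            decide ((pvPowsum c : Int) < n) &&
            decide (PySem.List.sorted (pvDigits (pvPowsum c)) id = c))).map
          (fun c => ((pvPowsum c : Nat) : Int)))).flatten
    PySem.List.sorted found id

-- ===== PRECONDITION & SPEC =====
def Spec_munchausen (n : Int) (out : List Int) : Prop := out = munchausen_alt n
instance (n : Int) (out : List Int) : Decidable (Spec_munchausen n out) := by unfold Spec_munchausen; infer_instance

-- ===== CLAIM (what is proved, stated in full; the proofs are below) =====
def Claim_equal_munchausen : Prop := ∀ (n : Int), Dom_munchausen n → Spec_munchausen n (munchausen n)

-- ===== LEMMAS AND PROOFS =====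

-- the digit power sum that both programs compute for one number
def pvS (m : Nat) : Nat := pvPowsum (pvDigits m)

-- per-digit contribution
def pvG (d : Nat) : Nat := if d = 0 then 0 else d ^ d

lemma pvPowsum_eq_sum_map (c : List Nat) : pvPowsum c = (c.map pvG).sum := by
  induction c with
  | nil => rfl
  | cons d t ih =>
      by_cases h : d = 0 <;>
        simp [pvPowsum, pvG, h, List.sum_cons, ← ih, pvPowsum]

lemma pvPowsum_perm {c₁ c₂ : List Nat} (h : c₁.Perm c₂) : pvPowsum c₁ = pvPowsum c₂ := by
  rw [pvPowsum_eq_sum_map, pvPowsum_eq_sum_map]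
  exact (h.map pvG).sum_eq

lemma pvDigitsAux_zero : pvDigitsAux 0 = [] := by rw [pvDigitsAux]

lemma pvDigitsAux_pos (m : Nat) (hm : m ≠ 0) :
    pvDigitsAux m = m % 10 :: pvDigitsAux (m / 10) := by
  obtain ⟨k, rfl⟩ := Nat.exists_eq_succ_of_ne_zero hm
  rw [pvDigitsAux]

lemma pvDigits_lt_ten (m : Nat) : ∀ x ∈ pvDigits m, x < 10 := by
  unfold pvDigits
  split
  · simp
  · rename_i hm
    clear hm
    induction m using Nat.strong_induction_on with
    | _ m ih =>
      match m with
      | 0 => simp [pvDigitsAux]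
      | (k+1) =>
        rw [pvDigitsAux_pos _ (Nat.succ_ne_zero k)]
        intro x hx
        rcases List.mem_cons.mp hx with h | h
        · subst h; exact Nat.mod_lt _ (by omega)
        · exact ih _ (Nat.div_lt_self (Nat.succ_pos k) (by omega)) x h

lemma pvDigits_ne_nil (m : Nat) : pvDigits m ≠ [] := by
  unfold pvDigits
  split
  · simp
  · rename_i hm
    rw [pvDigitsAux_pos _ hm]
    simp

lemma pvDigitsAux_len_mono : ∀ b a : Nat, a ≤ b →
    (pvDigitsAux a).length ≤ (pvDigitsAux b).length := by
  intro b
  induction b using Nat.strong_induction_on with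
  | _ b ih =>
    intro a hab
    match a with
    | 0 => simp [pvDigitsAux]
    | (k+1) =>
      have hb : b ≠ 0 := by omega
      rw [pvDigitsAux_pos _ (Nat.succ_ne_zero k), pvDigitsAux_pos _ hb]
      simp only [List.length_cons, Nat.add_le_add_iff_right]
      exact ih (b / 10) (Nat.div_lt_self (by omega) (by omega)) _
        (Nat.div_le_div_right hab)

lemma pvDigits_len_pos (m : Nat) : 1 ≤ (pvDigits m).length :=
  List.length_pos_iff.mpr (pvDigits_ne_nil m)

lemma pvDigits_len_mono {a b : Nat} (hab : a ≤ b) :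
    (pvDigits a).length ≤ (pvDigits b).length := by
  by_cases ha : a = 0
  · subst ha
    simpa [pvDigits] using pvDigits_len_pos b
  · have hb : b ≠ 0 := by omega
    simp only [pvDigits, if_neg ha, if_neg hb]
    exact pvDigitsAux_len_mono b a hab

-- ---- A's digit string: Nat.toDigitsCore versus pvDigits ----

lemma toDigitsCore_eq : ∀ (fuel n : Nat) (ds : List Char), n < fuel →
    Nat.toDigitsCore 10 fuel n ds = ((pvDigits n).map Nat.digitChar).reverse ++ ds := by
  intro fuel
  induction fuel with
  | zero => intro n ds h; omega
  | succ fuel ih =>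
    intro n ds h
    rw [Nat.toDigitsCore]
    by_cases h0 : n / 10 = 0
    · rw [if_pos h0]
      have : pvDigits n = [n % 10] := by
        unfold pvDigits
        by_cases hn : n = 0
        · subst hn; rfl
        · rw [if_neg hn, pvDigitsAux_pos _ hn, h0, pvDigitsAux_zero]
      rw [this]; rfl
    · rw [if_neg h0]
      have hn : n ≠ 0 := by
        intro hc; subst hc; simp at h0
      have hrec : n / 10 < fuel := by
        have hlt : n / 10 < n := Nat.div_lt_self (Nat.pos_of_ne_zero hn) (by omega)
        omega
      rw [ih (n / 10) _ hrec]
      have : pvDigits n = n % 10 :: pvDigits (n / 10) := by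
        unfold pvDigits
        rw [if_neg hn, if_neg h0, pvDigitsAux_pos _ hn]
      rw [this]
      simp

lemma toChars_natCast (m : Nat) :
    PySem.Int.toChars (m : Int) = ((pvDigits m).map Nat.digitChar).reverse := by
  unfold PySem.Int.toChars
  rw [if_neg (by omega), Nat.toDigits]
  have : (m : Int).toNat = m := Int.toNat_natCast m
  rw [this, toDigitsCore_eq m.succ m [] (Nat.lt_succ_self m)]
  simp

lemma digitVal_digitChar (r : Nat) (hr : r < 10) :
    munchausenDigitVal (Nat.digitChar r) = (r : Int) := by
  interval_cases r <;> decide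

-- the inner loop of A over a list of digit characters adds the digit power sum
lemma inner_fold_eq (ds : List Nat) (hds : ∀ x ∈ ds, x < 10) (num0 : Int) :
    (ds.map Nat.digitChar).foldl (fun num c =>
      if munchausenDigitVal c ≠ 0 then
        num + munchausenDigitVal c ^ (munchausenDigitVal c).toNat
      else num) num0 = num0 + ((ds.map pvG).sum : Int) := by
  induction ds generalizing num0 with
  | nil => simp
  | cons d t ih =>
    have hd : d < 10 := hds d (List.mem_cons_self)
    have ht : ∀ x ∈ t, x < 10 := fun x hx => hds x (List.mem_cons_of_mem _ hx)
    simp only [List.map_cons, List.foldl_cons, digitVal_digitChar d hd]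
    rw [ih ht]
    by_cases h0 : d = 0
    · subst h0; simp [pvG]
    · rw [if_pos (by exact_mod_cast h0)]
      have : ((d : Int)) ^ ((d : Int)).toNat = ((d ^ d : Nat) : Int) := by
        rw [Int.toNat_natCast]; push_cast; ring
      rw [this]
      simp [pvG, h0]
      ring

lemma inner_eq (m : Nat) (num0 : Int) :
    munchausenInner (m : Int) num0 = num0 + (pvS m : Int) := by
  unfold munchausenInner
  rw [toChars_natCast, ← List.map_reverse,
    inner_fold_eq _ (fun x hx => pvDigits_lt_ten m x (List.mem_reverse.mp hx)) num0,
    pvS, pvPowsum_eq_sum_map]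
  rw [List.map_reverse, List.sum_reverse]

-- ---- A's outer loop is a filter ----

lemma A_fold (l : List Int) (acc : List Int) :
    ((l.foldl (fun st i =>
      let num := munchausenInner i st.2
      ((if i = num then st.1 ++ [i] else st.1), (0 : Int))) (acc, (0 : Int))).1)
    = acc ++ l.filter (fun i => decide (i = munchausenInner i 0)) := by
  induction l generalizing acc with
  | nil => simp only [List.foldl_nil, List.filter_nil, List.append_nil]
  | cons i t ih =>
    simp only [List.foldl_cons, List.filter_cons]
    rw [ih]
    by_cases h : i = munchausenInner i 0
    · rw [if_pos h, if_pos (decide_eq_true h)]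
      simp
    · rw [if_neg h, if_neg (by simp [h])]

lemma munchausen_eq_filter (n : Int) :
    munchausen n = (PySem.List.pyRange 0 n).filter
      (fun i => decide (i = munchausenInner i 0)) := by
  unfold munchausen
  rw [A_fold]
  simp

-- ---- B's combinations ----

lemma mem_pvCombos : ∀ (L start : Nat) (c : List Nat),
    c ∈ pvCombos L start ↔
      c.length = L ∧ List.Pairwise (· ≤ ·) c ∧ ∀ x ∈ c, start ≤ x ∧ x ≤ 9 := by
  intro L
  induction L with
  | zero =>
    intro start c
    simp only [pvCombos, List.mem_singleton]
    constructor
    · rintro rfl; exact ⟨rfl, List.Pairwise.nil, by simp⟩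
    · rintro ⟨h, -, -⟩
      exact List.length_eq_zero_iff.mp h
  | succ L ih =>
    intro start c
    simp only [pvCombos, List.mem_flatten, List.mem_map]
    constructor
    · rintro ⟨piece, ⟨d, hd, rfl⟩, hc⟩
      obtain ⟨rest, hrest, rfl⟩ := List.mem_map.mp hc
      obtain ⟨hlen, hsort, hbound⟩ := (ih d rest).mp hrest
      have hd' : start ≤ d ∧ d < start + (10 - start) := List.mem_range'_1.mp hd
      refine ⟨by simp [hlen], ?_, ?_⟩
      · rw [List.pairwise_cons]
        exact ⟨fun x hx => (hbound x hx).1, hsort⟩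
      · intro x hx
        rcases List.mem_cons.mp hx with h | h
        · subst h; omega
        · have := hbound x h; omega
    · rintro ⟨hlen, hsort, hbound⟩
      match c with
      | [] => simp at hlen
      | d :: rest =>
        have hdb := hbound d List.mem_cons_self
        refine ⟨(pvCombos L d).map (fun r => d :: r), ⟨d, ?_, rfl⟩, ?_⟩
        · rw [List.mem_range'_1]; omega
        · rw [List.mem_map]
          refine ⟨rest, (ih d rest).mpr ⟨by simpa using hlen, (List.pairwise_cons.mp hsort).2,
            fun x hx => ⟨(List.pairwise_cons.mp hsort).1 x hx,
              (hbound x (List.mem_cons_of_mem _ hx)).2⟩⟩, rfl⟩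

lemma pvCombos_nodup : ∀ (L start : Nat), (pvCombos L start).Nodup := by
  intro L
  induction L with
  | zero => intro start; simp [pvCombos]
  | succ L ih =>
    intro start
    rw [pvCombos, List.nodup_flatten]
    constructor
    · intro piece hpiece
      obtain ⟨d, -, rfl⟩ := List.mem_map.mp hpiece
      exact (ih d).map (fun a b h => by injection h)
    · rw [List.pairwise_map]
      refine List.Pairwise.imp ?_ (List.pairwise_lt_range' 1)
      intro a b hab x hxa hxb
      obtain ⟨ra, -, rfl⟩ := List.mem_map.mp hxa
      obtain ⟨rb, -, hb⟩ := List.mem_map.mp hxb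
      have : a = b := by injection hb.symm
      omega

-- membership in B's candidate list
lemma mem_found (n : Int) (x : Int) :
    (x ∈ ((List.range' 1 ((pvDigits (n - 1).toNat).length)).map (fun len =>
        ((pvCombos len 0).filter (fun c =>
            decide ((pvPowsum c : Int) < n) &&
            decide (PySem.List.sorted (pvDigits (pvPowsum c)) id = c))).map
          (fun c => ((pvPowsum c : Nat) : Int)))).flatten)
    ↔ ∃ len ∈ List.range' 1 ((pvDigits (n - 1).toNat).length),
        ∃ c ∈ pvCombos len 0, ((pvPowsum c : Int) < n ∧
          PySem.List.sorted (pvDigits (pvPowsum c)) id = c) ∧ x = ((pvPowsum c : Nat) : Int) := by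
  constructor
  · intro hx
    obtain ⟨piece, hpiece, hxp⟩ := List.mem_flatten.mp hx
    obtain ⟨len, hlen, rfl⟩ := List.mem_map.mp hpiece
    obtain ⟨c, hc, rfl⟩ := List.mem_map.mp hxp
    have hcf := List.mem_filter.mp hc
    refine ⟨len, hlen, c, hcf.1, ?_, rfl⟩
    simpa [Bool.and_eq_true, decide_eq_true_eq] using hcf.2
  · rintro ⟨len, hlen, c, hc, hcond, rfl⟩
    exact List.mem_flatten.mpr ⟨_, List.mem_map.mpr ⟨len, hlen, rfl⟩,
      List.mem_map.mpr ⟨c, List.mem_filter.mpr ⟨hc, by simp [hcond.1, hcond.2]⟩, rfl⟩⟩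

-- B's verification condition pins c to the sorted digits of its power sum
lemma found_value_eq {c : List Nat}
    (hsd : PySem.List.sorted (pvDigits (pvPowsum c)) id = c) :
    pvS (pvPowsum c) = pvPowsum c := by
  have hperm : (PySem.List.sorted (pvDigits (pvPowsum c)) id).Perm (pvDigits (pvPowsum c)) :=
    PySem.List.sorted_perm _ _ _
  rw [hsd] at hperm
  calc pvS (pvPowsum c) = pvPowsum (pvDigits (pvPowsum c)) := rfl
    _ = pvPowsum c := (pvPowsum_perm hperm.symm)

lemma found_nodup (n : Int) :
    (((List.range' 1 ((pvDigits (n - 1).toNat).length)).map (fun len =>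
        ((pvCombos len 0).filter (fun c =>
            decide ((pvPowsum c : Int) < n) &&
            decide (PySem.List.sorted (pvDigits (pvPowsum c)) id = c))).map
          (fun c => ((pvPowsum c : Nat) : Int)))).flatten).Nodup := by
  rw [List.nodup_flatten]
  constructor
  · intro piece hpiece
    obtain ⟨len, -, rfl⟩ := List.mem_map.mp hpiece
    refine List.Nodup.map_on ?_ ((pvCombos_nodup len 0).filter _)
    intro c1 h1 c2 h2 heq
    have h1' := (List.mem_filter.mp h1).2
    have h2' := (List.mem_filter.mp h2).2
    simp only [Bool.and_eq_true, decide_eq_true_eq] at h1' h2'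
    have hps : pvPowsum c1 = pvPowsum c2 := by exact_mod_cast heq
    rw [← h1'.2, ← h2'.2, hps]
  · rw [List.pairwise_map]
    refine List.Pairwise.imp ?_ (List.pairwise_lt_range' 1)
    intro a b hab x hxa hxb
    obtain ⟨c1, hc1, rfl⟩ := List.mem_map.mp hxa
    obtain ⟨c2, hc2, heq⟩ := List.mem_map.mp hxb
    have hc1m := List.mem_filter.mp hc1
    have hc2m := List.mem_filter.mp hc2
    simp only [Bool.and_eq_true, decide_eq_true_eq] at hc1m hc2m
    have hps : pvPowsum c1 = pvPowsum c2 := by exact_mod_cast heq.symm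
    have hceq : c1 = c2 := by rw [← hc1m.2.2, ← hc2m.2.2, hps]
    have hl1 : c1.length = a := ((mem_pvCombos a 0 c1).mp hc1m.1).1
    have hl2 : c2.length = b := ((mem_pvCombos b 0 c2).mp hc2m.1).1
    rw [hceq] at hl1
    omega

-- ===== VERDICT (by name: the statement is the Claim_ definition above) =====
theorem munchausen_spec : Claim_equal_munchausen := by
  intro n _
  unfold Spec_munchausen
  have halt : munchausen_alt n = if n ≤ 0 then ([] : List Int) else
      PySem.List.sorted (((List.range' 1 ((pvDigits (n - 1).toNat).length)).map (fun len =>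
        ((pvCombos len 0).filter (fun c =>
            decide ((pvPowsum c : Int) < n) &&
            decide (PySem.List.sorted (pvDigits (pvPowsum c)) id = c))).map
          (fun c => ((pvPowsum c : Nat) : Int)))).flatten) id := rfl
  rw [halt]
  by_cases hn : n ≤ 0
  · rw [if_pos hn, munchausen_eq_filter]
    have : PySem.List.pyRange 0 n = [] := by
      unfold PySem.List.pyRange
      rw [if_neg (by norm_num)]
      simp only []
      rw [if_pos (by norm_num), if_neg (by omega)]
      simp
    rw [this]; rfl
  · rw [if_neg hn]
    rw [not_le] at hn
    set N := n.toNat with hN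
    have hNn : (N : Int) = n := Int.toNat_of_nonneg (le_of_lt hn)
    have hN1 : (n - 1).toNat = N - 1 := by omega
    have hNpos : 1 ≤ N := by omega
    -- A's list
    have hrange : PySem.List.pyRange 0 n = (List.range N).map (fun k : Nat => (k : Int)) := by
      rw [← hNn, PySem.List.pyRange_zero_natCast]
    rw [munchausen_eq_filter, hrange, List.filter_map]
    -- characterise the filter predicate on Nat
    have hfilt : ∀ m : Nat,
        ((fun i => decide (i = munchausenInner i 0)) ∘ (fun k : Nat => (k : Int))) m
          = decide (m = pvS m) := by
      intro m
      simp only [Function.comp, inner_eq m 0, zero_add]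
      exact decide_eq_decide.mpr Int.natCast_inj
    rw [List.filter_congr (fun m _ => hfilt m)]
    -- the two lists are permutations; A's is strictly increasing
    set ys : List Int := ((List.range N).filter (fun m => decide (m = pvS m))).map
      (fun k : Nat => (k : Int)) with hys
    set fnd : List Int := ((List.range' 1 ((pvDigits (n - 1).toNat).length)).map (fun len =>
        ((pvCombos len 0).filter (fun c =>
            decide ((pvPowsum c : Int) < n) &&
            decide (PySem.List.sorted (pvDigits (pvPowsum c)) id = c))).map
          (fun c => ((pvPowsum c : Nat) : Int)))).flatten with hfnd
    have hysnodup : ys.Nodup := by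
      refine List.Nodup.map (fun a b h => by exact_mod_cast h) ?_
      exact (List.nodup_range).filter _
    have hyspw : List.Pairwise (fun a b : Int => id a < id b) ys := by
      rw [hys, List.pairwise_map]
      refine List.Pairwise.imp ?_ (List.pairwise_lt_range.filter _)
      intro a b hab
      simpa using hab
    have hmem : ∀ x : Int, x ∈ fnd ↔ x ∈ ys := by
      intro x
      rw [hfnd, mem_found n x, hys]
      constructor
      · rintro ⟨len, hlen, c, hc, ⟨hlt, hsd⟩, rfl⟩
        rw [List.mem_map]
        refine ⟨pvPowsum c, ?_, rfl⟩
        rw [List.mem_filter]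
        constructor
        · rw [List.mem_range]; omega
        · simp only [decide_eq_true_eq]
          exact (found_value_eq hsd).symm
      · rw [List.mem_map]
        rintro ⟨m, hm, rfl⟩
        rw [List.mem_filter, List.mem_range] at hm
        obtain ⟨hmN, hS⟩ := hm
        simp only [decide_eq_true_eq] at hS
        set c : List Nat := PySem.List.sorted (pvDigits m) id with hc
        have hperm : c.Perm (pvDigits m) := PySem.List.sorted_perm _ _ _
        have hps : pvPowsum c = m := by
          rw [pvPowsum_perm hperm]
          exact hS.symm
        refine ⟨c.length, ?_, c, ?_, ⟨?_, ?_⟩, by rw [hps]⟩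
        · rw [List.mem_range'_1, hN1]
          have hlen1 : 1 ≤ c.length := by
            rw [hperm.length_eq]
            exact pvDigits_len_pos m
          have hlen2 : c.length ≤ (pvDigits (N - 1)).length := by
            rw [hperm.length_eq]
            exact pvDigits_len_mono (by omega)
          omega
        · rw [mem_pvCombos]
          refine ⟨rfl, ?_, ?_⟩
          · have := PySem.List.sorted_pairwise (pvDigits m) (id : Nat → Nat)
            simpa using this
          · intro x hx
            have : x ∈ pvDigits m := hperm.mem_iff.mp hx
            have := pvDigits_lt_ten m x this
            omega
        · rw [hps]; omega
        · rw [hps]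

    have hfndnodup : fnd.Nodup := found_nodup n
    have hperm : ys.Perm fnd := by
      refine List.perm_of_nodup_nodup_toFinset_eq hysnodup hfndnodup ?_
      ext x
      simp only [List.mem_toFinset]
      exact (hmem x).symm
    exact (PySem.List.sorted_eq_of_perm_of_pairwise_lt fnd ys id hperm hyspw).symm
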